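-- pv_equiv track=rewrite | github.com/samz-github/Babun | download_youtube_srt.py | get_suppport_language
-- ===== SOURCE A (Python) =====
-- def get_suppport_language(all_captions):
--     CN = '''code="zh-CN"'''
--     TW = '''code="zh-TW"'''
--     EN = '''code="en"'''
--     for caption in all_captions:
--         if  str(caption).find(CN) != -1:
--             return "zh-CN"
--     for caption in all_captions:
--         if  str(caption).find(TW) != -1:
--             return "zh-TW"
--     for caption in all_captions:
--         if  str(caption).find(EN) != -1:
--             return "en"
-- ===== SOURCE B (Python) =====
-- def get_suppport_language(all_captions):
--     CN = '''code="zh-CN"'''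
--     TW = '''code="zh-TW"'''
--     EN = '''code="en"'''
--     found_tw = False
--     found_en = False
--     for caption in all_captions:
--         s = str(caption)
--         if CN in s:
--             return "zh-CN"
--         if TW in s:
--             found_tw = True
--         if EN in s:
--             found_en = True
--     if found_tw:
--         return "zh-TW"
--     if found_en:
--         return "en"
-- ===== Notes on version B (the rewrite author's own statement) =====
-- stated objective: faster
-- what changed: Replaced A's three sequential scans of all_captions with one single pass that returns zh-CN immediately and records TW/EN hits in boolean flags resolved after the loop.
import Mathlib
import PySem

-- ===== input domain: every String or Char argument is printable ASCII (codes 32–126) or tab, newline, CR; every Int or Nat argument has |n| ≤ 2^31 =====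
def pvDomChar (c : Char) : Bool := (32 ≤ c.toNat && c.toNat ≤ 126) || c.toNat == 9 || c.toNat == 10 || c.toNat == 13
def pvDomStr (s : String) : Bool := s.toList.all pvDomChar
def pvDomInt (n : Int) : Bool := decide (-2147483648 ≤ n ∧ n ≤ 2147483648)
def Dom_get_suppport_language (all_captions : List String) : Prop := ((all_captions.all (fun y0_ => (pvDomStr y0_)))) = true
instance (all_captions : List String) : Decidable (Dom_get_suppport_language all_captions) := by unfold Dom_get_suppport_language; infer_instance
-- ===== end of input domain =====

-- B replaces A's three sequential scans with one single pass using TW/EN flags (constant-factor faster; return value only).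


def pvCN : String := "code=\"zh-CN\""
def pvTW : String := "code=\"zh-TW\""
def pvEN : String := "code=\"en\""

-- ===== PORT A =====
-- A's three loops: each is a first-match scan with `str(caption).find(M) != -1`.
def pvScanA (m : String) (res : String) : List String → Option String
  | [] => none
  | c :: rest => if PySem.Str.find c m ≠ -1 then some res else pvScanA m res rest

def get_suppport_language (all_captions : List String) : Option String :=
  match pvScanA pvCN "zh-CN" all_captions with
  | some r => some r
  | none =>
    match pvScanA pvTW "zh-TW" all_captions with
    | some r => some r
    | none =>
      match pvScanA pvEN "en" all_captions with
      | some r => some r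
      | none => none

-- ===== PORT B =====
-- B's single loop with found_tw/found_en flags, `M in s` membership tests.
def pvLoopB : List String → Bool → Bool → Option String
  | [], tw, en => if tw then some "zh-TW" else if en then some "en" else none
  | c :: rest, tw, en =>
    if PySem.Str.isIn pvCN c then some "zh-CN"
    else pvLoopB rest (if PySem.Str.isIn pvTW c then true else tw)
                      (if PySem.Str.isIn pvEN c then true else en)

def get_suppport_language_alt (all_captions : List String) : Option String :=
  pvLoopB all_captions false false

-- ===== PRECONDITION & SPEC =====
def Spec_get_suppport_language (all_captions : List String) (out : Option String) : Prop := out = get_suppport_language_alt all_captions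
instance (all_captions : List String) (out : Option String) : Decidable (Spec_get_suppport_language all_captions out) := by unfold Spec_get_suppport_language; infer_instance

-- ===== CLAIM (what is proved, stated in full; the proofs are below) =====
def Claim_equal_get_suppport_language : Prop := ∀ (all_captions : List String), Dom_get_suppport_language all_captions → Spec_get_suppport_language all_captions (get_suppport_language all_captions)

-- ===== LEMMAS AND PROOFS =====

-- `find ≠ -1` and `isIn` agree (both mean "substring occurs")
theorem pv_find_eq_isIn (c m : String) :
    (PySem.Str.find c m ≠ -1) ↔ PySem.Str.isIn m c = true := by
  rw [PySem.Str.find_ne_neg_one_iff, PySem.Str.isIn_iff_infix]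

-- A's scans are "any" checks
theorem pvScanA_eq_any (m res : String) (l : List String) :
    pvScanA m res l =
      if (l.any fun c => PySem.Str.isIn m c) = true then some res else none := by
  induction l with
  | nil => simp [pvScanA]
  | cons c rest ih =>
    rw [pvScanA, ih, List.any_cons]
    by_cases h : PySem.Str.isIn m c = true
    · rw [if_pos ((pv_find_eq_isIn c m).2 h), if_pos (by rw [h, Bool.true_or])]
    · have hb : PySem.Str.isIn m c = false := by rwa [Bool.not_eq_true] at h
      rw [if_neg (fun hf => h ((pv_find_eq_isIn c m).1 hf)), hb, Bool.false_or]

-- characterisation of B's loop against A's pieces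
theorem pvLoopB_eq (l : List String) (tw en : Bool) :
    pvLoopB l tw en =
      match pvScanA pvCN "zh-CN" l with
      | some r => some r
      | none =>
        if (tw || l.any fun c => PySem.Str.isIn pvTW c) = true then some "zh-TW"
        else if (en || l.any fun c => PySem.Str.isIn pvEN c) = true then some "en"
        else none := by
  induction l generalizing tw en with
  | nil => cases tw <;> cases en <;> rfl
  | cons c rest ih =>
    simp only [pvLoopB, pvScanA]
    by_cases hcn : PySem.Str.isIn pvCN c = true
    · rw [if_pos hcn, if_pos ((pv_find_eq_isIn c pvCN).2 hcn)]
    · rw [if_neg hcn, if_neg (fun hf => hcn ((pv_find_eq_isIn c pvCN).1 hf)), ih]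
      cases pvScanA pvCN "zh-CN" rest with
      | some r => rfl
      | none =>
        simp only [List.any_cons]
        by_cases htw : PySem.Str.isIn pvTW c = true <;>
          by_cases hen : PySem.Str.isIn pvEN c = true <;>
            simp [htw, hen, or_comm, or_left_comm, or_assoc]

-- ===== VERDICT (by name: the statement is the Claim_ definition above) =====
theorem get_suppport_language_spec : Claim_equal_get_suppport_language := by
  intro l _
  show get_suppport_language l = get_suppport_language_alt l
  unfold get_suppport_language get_suppport_language_alt
  rw [pvLoopB_eq, pvScanA_eq_any pvTW, pvScanA_eq_any pvEN]
  cases pvScanA pvCN "zh-CN" l with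
  | some r => rfl
  | none =>
    simp only [Bool.false_or]
    by_cases htw : (l.any fun c => PySem.Str.isIn pvTW c) = true
    · rw [if_pos htw, if_pos htw]
    · rw [if_neg htw]
      by_cases hen : (l.any fun c => PySem.Str.isIn pvEN c) = true
      · rw [if_pos hen]
        rw [if_neg htw]
      · rw [if_neg hen]
        rw [if_neg htw]
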